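-- pv_equiv track=rewrite | github.com/nd7141/reconstruction | main.py | reconstruct_dfs
-- ===== SOURCE A (Python) =====
-- def replace(P, source, target):
--     '''Replace last occurrence of source with source-target-source.'''
--     assert source in P
--     ix = len(P) - P[::-1].index(source)
--     return P[:ix] + [target, P[ix - 1]] + P[ix:]
--
-- def reconstruct_dfs(Dl):
--     P = [0] # supporting walk
--     S = [0] # stack of nodes to check
--     checked = dict() # nodes that has been checked for edge
--     while len(S) > 0: # grow supporting walk in DFS manner
--         curr = S[-1]
--         x = max(P) + 1 # next node to check
--         for u in range(curr+1, x): # u is already in the supporting walk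
--             # check if there is connection to already discovered nodes
--             if u not in checked[curr]: # see if we already checked this edge
--                 rpl = replace(P, curr, u)
--                 if tuple(rpl) in Dl:
--                     P = rpl # add additional edge to the support walk
--                 checked.setdefault(curr, set()).add(u)
--
--         # check if the current node is connected to a not-yet-discovered node
--         rpl = replace(P, curr, x)
--         if tuple(rpl) in Dl: # move one level up in the walk
--             checked.setdefault(curr, set()).add(x)
--             S.append(x)
--             P = rpl
--         else: # move one level down in the walk
--             S.pop()
--     return P
-- ===== SOURCE B (Python) =====
-- def reconstruct_dfs(Dl):
--     def insert_after_last(P, source, target):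
--         '''Insert [target, source] right after the last occurrence of source.'''
--         assert source in P
--         if source in P[1:]:
--             return [P[0]] + insert_after_last(P[1:], source, target)
--         return [P[0], target, source] + P[1:]
--
--     checked = set()  # set of already-checked (node, neighbour) pairs
--     P = [0]  # supporting walk
--
--     def visit(curr):
--         nonlocal P
--         while True:
--             x = max(P) + 1  # next node to check
--             u = curr + 1
--             while u < x:  # u is already in the supporting walk
--                 if (curr, u) not in checked:
--                     rpl = insert_after_last(P, curr, u)
--                     if tuple(rpl) in Dl:
--                         P = rpl
--                     checked.add((curr, u))
--                 u += 1
--             rpl = insert_after_last(P, curr, x)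
--             if tuple(rpl) in Dl:
--                 checked.add((curr, x))
--                 P = rpl
--                 visit(x)
--             else:
--                 return
--
--     visit(0)
--     return P
-- ===== Notes on version B (the rewrite author's own statement) =====
-- stated objective: alternative
-- what changed: The explicit-stack DFS loop becomes a recursive visit(curr) helper, the checked dict-of-sets becomes a flat set of (node, neighbour) pairs, the slice/reverse-index replace helper becomes a recursive insert-after-last-occurrence, and the for-loop over range becomes a while-loop counter.
import Mathlib
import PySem

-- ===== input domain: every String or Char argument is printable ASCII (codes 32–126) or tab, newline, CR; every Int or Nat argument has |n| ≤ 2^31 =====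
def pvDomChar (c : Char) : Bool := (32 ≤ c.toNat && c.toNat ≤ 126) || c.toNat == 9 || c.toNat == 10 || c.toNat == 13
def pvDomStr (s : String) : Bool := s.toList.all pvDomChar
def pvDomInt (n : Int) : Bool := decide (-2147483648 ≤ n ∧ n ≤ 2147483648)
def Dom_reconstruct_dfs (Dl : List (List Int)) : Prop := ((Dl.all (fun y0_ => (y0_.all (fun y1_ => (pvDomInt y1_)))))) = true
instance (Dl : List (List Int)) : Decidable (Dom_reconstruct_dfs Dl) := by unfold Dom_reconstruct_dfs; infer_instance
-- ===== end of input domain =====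

-- B replaces A's explicit-stack DFS with a recursive visit(curr), the checked dict-of-sets with a
-- flat set of (node, neighbour) pairs, the slice-based replace with a recursive insert-after-last
-- helper, and the for-loop over range with a while-loop counter (objective: alternative, same cost).

-- ===== PORT A =====
-- module helper: replace(P, source, target).  'P[::-1]' is P.reverse; 'assert source in P' holds
-- at every call site (curr is in P), so the .getD defaults below are never consulted:
-- index? returns some (source ∈ P) and 1 ≤ ix ≤ len P, so P[ix-1] is in range.
def pyreplace (P : List Int) (source target : Int) : List Int :=
  let ix : Nat := P.length - ((PySem.List.index? P.reverse source).getD 0)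
  PySem.List.slice P none (some (ix : Int)) ++ [target, PySem.List.pyGetD P ((ix : Int) - 1) 0]
    ++ PySem.List.slice P (some (ix : Int)) none

-- inner for-loop body over u ∈ range(curr+1, x), threading (P, checked); the lookup
-- 'checked[curr]' is ported as getD with an empty-set default: whenever the range is nonempty,
-- curr already has an entry (set when its first child was pushed), so Python's KeyError and the
-- default are both unreachable and the port is exact.
def pvForU (Dl : List (List Int)) (curr : Int)
    (pc : List Int × PySem.Dict Int (PySem.Set Int)) (u : Int) :
    List Int × PySem.Dict Int (PySem.Set Int) :=
  if PySem.Set.contains (pc.2.getD curr PySem.Set.empty) u then pc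
  else
    let rpl := pyreplace pc.1 curr u
    let P' := if rpl ∈ Dl then rpl else pc.1
    -- checked.setdefault(curr, set()).add(u)  =  modify with default empty set
    (P', pc.2.modify curr PySem.Set.empty (fun s => PySem.Set.add s u))

-- the while-loop of A; one fuel unit per iteration (the guard only totalizes the loop: the fuel
-- supplied below always exceeds the number of iterations the Python performs).
-- max(P) is ported with an unreachable default (P always contains 0, so it is never empty).
def pvLoopA (Dl : List (List Int)) : Nat → List Int → List Int →
    PySem.Dict Int (PySem.Set Int) → List Int
  | 0, _, P, _ => P
  | _ + 1, [], P, _ => P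
  | f + 1, curr :: S, P, checked =>
    let x := ((PySem.List.max? P (fun y => y)).getD 0) + 1
    let pc := (PySem.List.pyRange (curr + 1) x 1).foldl (pvForU Dl curr) (P, checked)
    let rpl := pyreplace pc.1 curr x
    if rpl ∈ Dl then
      pvLoopA Dl f (x :: curr :: S) rpl (pc.2.modify curr PySem.Set.empty (fun s => PySem.Set.add s x))
    else
      pvLoopA Dl f S pc.1 pc.2

def reconstruct_dfs (Dl : List (List Int)) : List Int :=
  pvLoopA Dl ((Dl.map List.length).sum + 2) [0] [0] PySem.Dict.empty

-- ===== PORT B =====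
-- B's helper insert_after_last: recursion on the walk; 'source in P[1:]' is the membership test
-- on the tail; the [] case is the (unreachable at every call site) failing assert.
def insAfterLast (P : List Int) (source target : Int) : List Int :=
  match P with
  | [] => []
  | a :: rest =>
    if source ∈ rest then a :: insAfterLast rest source target
    else a :: target :: source :: rest

-- B's inner 'while u < x' loop, threading the walk P and the flat checked set of pairs;
-- the structural counter n = (x - u).toNat is the exact number of iterations the while performs
-- (u counts up by 1, x does not change inside the loop).
def pvScanB (Dl : List (List Int)) (curr : Int) : Nat → Int → Int → List Int →
    PySem.Set (Int × Int) → List Int × PySem.Set (Int × Int)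
  | 0, _, _, P, ck => (P, ck)
  | n + 1, u, x, P, ck =>
    let st :=
      if PySem.Set.contains ck (curr, u) then (P, ck)
      else
        let rpl := insAfterLast P curr u
        ((if rpl ∈ Dl then rpl else P), PySem.Set.add ck (curr, u))
    pvScanB Dl curr n (u + 1) x st.1 st.2

-- B's recursive visit(curr): an inner 'while True' (one fuel unit per iteration, same global
-- fuel budget as A's loop guard; the result carries the remaining fuel, never grown, which
-- justifies termination of the trailing while-True iteration as a second recursive call).
def pvVisitB (Dl : List (List Int)) :
    (fuel : Nat) → Int → List Int → PySem.Set (Int × Int) →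
    {r : Nat × List Int × PySem.Set (Int × Int) // r.1 ≤ fuel}
  | 0, _, P, ck => ⟨(0, P, ck), Nat.le_refl 0⟩
  | f + 1, curr, P, ck =>
    let x := ((PySem.List.max? P (fun y => y)).getD 0) + 1
    let st := pvScanB Dl curr (x - (curr + 1)).toNat (curr + 1) x P ck
    let rpl := insAfterLast st.1 curr x
    if rpl ∈ Dl then
      let r1 := pvVisitB Dl f x rpl (PySem.Set.add st.2 (curr, x))
      let r2 := pvVisitB Dl r1.val.1 curr r1.val.2.1 r1.val.2.2
      ⟨r2.val, Nat.le_trans r2.prop (Nat.le_trans r1.prop (Nat.le_succ f))⟩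
    else
      ⟨(f, st.1, st.2), Nat.le_succ f⟩
  termination_by fuel => fuel
  decreasing_by
  · exact Nat.lt_succ_self f
  · exact Nat.lt_succ_of_le r1.prop

def reconstruct_dfs_alt (Dl : List (List Int)) : List Int :=
  (pvVisitB Dl ((Dl.map List.length).sum + 2) 0 [0] PySem.Set.empty).val.2.1

-- ===== PRECONDITION & SPEC =====
def Spec_reconstruct_dfs (Dl : List (List Int)) (out : List Int) : Prop := out = reconstruct_dfs_alt Dl
instance (Dl : List (List Int)) (out : List Int) : Decidable (Spec_reconstruct_dfs Dl out) := by unfold Spec_reconstruct_dfs; infer_instance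

-- ===== CLAIM (what is proved, stated in full; the proofs are below) =====
def Claim_equal_reconstruct_dfs : Prop := ∀ (Dl : List (List Int)), Dom_reconstruct_dfs Dl → Spec_reconstruct_dfs Dl (reconstruct_dfs Dl)

-- ===== LEMMAS AND PROOFS =====

-- proof-only helper: A's stack loop re-expressed as a recursive visit (same dict/foldl body as
-- pvLoopA; used only to bridge the two control structures).
def pvVisitA (Dl : List (List Int)) :
    (fuel : Nat) → Int → List Int → PySem.Dict Int (PySem.Set Int) →
    {r : Nat × List Int × PySem.Dict Int (PySem.Set Int) // r.1 ≤ fuel}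
  | 0, _, P, checked => ⟨(0, P, checked), Nat.le_refl 0⟩
  | f + 1, curr, P, checked =>
    let x := ((PySem.List.max? P (fun y => y)).getD 0) + 1
    let pc := (PySem.List.pyRange (curr + 1) x 1).foldl (pvForU Dl curr) (P, checked)
    let rpl := pyreplace pc.1 curr x
    if rpl ∈ Dl then
      let r1 := pvVisitA Dl f x rpl (pc.2.modify curr PySem.Set.empty (fun s => PySem.Set.add s x))
      let r2 := pvVisitA Dl r1.val.1 curr r1.val.2.1 r1.val.2.2
      ⟨r2.val, Nat.le_trans r2.prop (Nat.le_trans r1.prop (Nat.le_succ f))⟩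
    else
      ⟨(f, pc.1, pc.2), Nat.le_succ f⟩
  termination_by fuel => fuel
  decreasing_by
  · exact Nat.lt_succ_self f
  · exact Nat.lt_succ_of_le r1.prop

-- A's stack loop with curr on top = one pvVisitA call, then the loop on the rest of the stack.
lemma pvLoopA_eq_visit (Dl : List (List Int)) :
    ∀ (f : Nat) (curr : Int) (S P : List Int) (checked : PySem.Dict Int (PySem.Set Int)),
      pvLoopA Dl f (curr :: S) P checked =
        pvLoopA Dl (pvVisitA Dl f curr P checked).val.1 S
          (pvVisitA Dl f curr P checked).val.2.1 (pvVisitA Dl f curr P checked).val.2.2 := by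
  intro f
  induction f using Nat.strong_induction_on with
  | _ f ih =>
    intro curr S P checked
    match f with
    | 0 => simp [pvLoopA, pvVisitA]
    | f + 1 =>
      rw [pvLoopA, pvVisitA]
      simp only
      split
      · rw [ih f (Nat.lt_succ_self f)]
        rw [ih _ (Nat.lt_succ_of_le (pvVisitA Dl f _ _ _).prop)]
      · rfl

lemma pvLoopA_nil (Dl : List (List Int)) (f : Nat) (P : List Int)
    (checked : PySem.Dict Int (PySem.Set Int)) : pvLoopA Dl f [] P checked = P := by
  cases f <;> rfl

-- the correspondence between A's checked : dict node → set and B's checked : set of pairs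
def pvRel (d : PySem.Dict Int (PySem.Set Int)) (ck : PySem.Set (Int × Int)) : Prop :=
  ∀ c v : Int, v ∈ d.getD c PySem.Set.empty ↔ (c, v) ∈ ck

lemma rel_empty : pvRel PySem.Dict.empty PySem.Set.empty := by
  intro c v
  constructor
  · intro h
    simp [PySem.Dict.getD_empty, PySem.Set.empty] at h
  · intro h
    simp [PySem.Set.empty] at h

lemma rel_add {d : PySem.Dict Int (PySem.Set Int)} {ck : PySem.Set (Int × Int)}
    (h : pvRel d ck) (c u : Int) :
    pvRel (d.modify c PySem.Set.empty (fun s => PySem.Set.add s u))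
        (PySem.Set.add ck (c, u)) := by
  intro c' v
  rw [PySem.Dict.getD_modify]
  by_cases hc : c' = c
  · subst hc
    rw [if_pos rfl]
    simp only [PySem.Set.mem_add, h c' v, Prod.mk.injEq]
    tauto
  · rw [if_neg hc]
    simp only [PySem.Set.mem_add, h c' v, Prod.mk.injEq]
    tauto

-- insAfterLast preserves membership and inserts the target
lemma mem_insAfterLast {y : Int} (P : List Int) (s t : Int) (h : y ∈ P) :
    y ∈ insAfterLast P s t := by
  induction P with
  | nil => simp at h
  | cons a rest ih =>
    rw [insAfterLast]
    rcases List.mem_cons.mp h with rfl | hy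
    · split <;> simp
    · split
      · exact List.mem_cons_of_mem _ (ih hy)
      · simp [hy]

lemma target_mem_insAfterLast (P : List Int) (s t : Int) (h : s ∈ P) :
    t ∈ insAfterLast P s t := by
  induction P with
  | nil => simp at h
  | cons a rest ih =>
    rw [insAfterLast]
    by_cases hs : s ∈ rest
    · simp [if_pos hs, ih hs]
    · simp [if_neg hs]

-- the slice-based replace of A agrees with B's recursive insert when source ∈ P
lemma pyreplace_cons_of_mem (a s t : Int) (rest : List Int) (h : s ∈ rest) :
    pyreplace (a :: rest) s t = a :: pyreplace rest s t := by
  unfold pyreplace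
  have hsrev : s ∈ rest.reverse := List.mem_reverse.mpr h
  obtain ⟨i, hi⟩ := Option.isSome_iff_exists.mp ((PySem.List.index?_isSome_iff rest.reverse s).mpr hsrev)
  have hilt : i < rest.length := by
    obtain ⟨pre, suf, hsplit, hlen, _⟩ := (PySem.List.index?_eq_some_iff rest.reverse s i).mp hi
    have : rest.reverse.length = pre.length + suf.length + 1 := by
      rw [hsplit]; simp; omega
    simp at this; omega
  have hrevcons : (a :: rest).reverse = rest.reverse ++ [a] := by simp
  rw [hrevcons, PySem.List.index?_append_of_mem _ hsrev, hi]
  simp only [Option.getD_some, List.length_cons]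
  have hix : rest.length + 1 - i = (rest.length - i) + 1 := by omega
  rw [hix]
  set m : Nat := rest.length - i with hm
  have hm1 : 1 ≤ m := by omega
  rw [PySem.List.slice_to_natCast, PySem.List.slice_to_natCast,
      PySem.List.slice_from_natCast, PySem.List.slice_from_natCast]
  have hc1 : ((((m + 1 : Nat) : Int)) - 1) = ((m : Nat) : Int) := by push_cast; ring
  have hc2 : (((m : Nat) : Int) - 1) = (((m - 1 : Nat) : Int)) := by
    push_cast [hm1]; omega
  rw [hc1, hc2, PySem.List.pyGetD_natCast, PySem.List.pyGetD_natCast]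
  simp only [List.take_succ_cons, List.drop_succ_cons]
  have hget : (a :: rest).getD m 0 = rest.getD (m - 1) 0 := by
    obtain ⟨k, hk⟩ := Nat.exists_eq_add_of_le hm1
    rw [show m = k + 1 by omega]
    simp
  rw [hget]
  simp

lemma pyreplace_cons_self_of_not_mem (s t : Int) (rest : List Int) (h : s ∉ rest) :
    pyreplace (s :: rest) s t = s :: t :: s :: rest := by
  unfold pyreplace
  have hsrev : s ∉ rest.reverse := fun hc => h (List.mem_reverse.mp hc)
  have hrevcons : (s :: rest).reverse = rest.reverse ++ [s] := by simp
  rw [hrevcons, PySem.List.index?_append_singleton_self rest.reverse s hsrev]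
  simp only [Option.getD_some, List.length_cons, List.length_reverse]
  have hix : rest.length + 1 - rest.length = 1 := by omega
  rw [hix]
  have h1 : ((1 : Nat) : Int) = (1 : Int) := by norm_num
  rw [← h1, PySem.List.slice_to_natCast, PySem.List.slice_from_natCast]
  norm_num [PySem.List.pyGetD]

lemma pyreplace_eq_insAfterLast (P : List Int) (s t : Int) (h : s ∈ P) :
    pyreplace P s t = insAfterLast P s t := by
  induction P with
  | nil => simp at h
  | cons a rest ih =>
    rw [insAfterLast]
    by_cases hs : s ∈ rest
    · rw [if_pos hs, pyreplace_cons_of_mem a s t rest hs, ih hs]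
    · rcases List.mem_cons.mp h with rfl | hy
      · rw [if_neg hs, pyreplace_cons_self_of_not_mem s t rest hs]
      · exact absurd hy hs

-- B's inner loop preserves membership in the walk
lemma scanB_mono (Dl : List (List Int)) (curr : Int) :
    ∀ (n : Nat) (u x : Int), ∀ (P : List Int) (ck : PySem.Set (Int × Int))
      (y : Int), y ∈ P → y ∈ (pvScanB Dl curr n u x P ck).1 := by
  intro n
  induction n with
  | zero =>
    intro u x P ck y hy
    exact hy
  | succ n ih =>
    intro u x P ck y hy
    rw [pvScanB]
    apply ih (u + 1) x
    split
    · exact hy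
    · simp only
      split
      · exact mem_insAfterLast _ _ _ hy
      · exact hy

-- B's visit preserves membership in the walk
lemma visitB_mono (Dl : List (List Int)) :
    ∀ (f : Nat) (curr : Int) (P : List Int) (ck : PySem.Set (Int × Int)) (y : Int),
      y ∈ P → y ∈ (pvVisitB Dl f curr P ck).val.2.1 := by
  intro f
  induction f using Nat.strong_induction_on with
  | _ f ih =>
    intro curr P ck y hy
    match f with
    | 0 => rw [pvVisitB]; exact hy
    | f + 1 =>
      rw [pvVisitB]
      simp only
      split
      · apply ih _ (Nat.lt_succ_of_le (pvVisitB Dl f _ _ _).prop)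
        apply ih f (Nat.lt_succ_self f)
        apply mem_insAfterLast
        exact scanB_mono Dl curr _ _ _ _ _ _ hy
      · exact scanB_mono Dl curr _ _ _ _ _ _ hy

-- the inner loops agree: A's foldl over range(curr+1, x) with the dict vs B's while-loop with pairs
lemma scan_eq (Dl : List (List Int)) (curr x : Int) :
    ∀ (n : Nat) (u : Int), (x - u).toNat = n →
    ∀ (P : List Int) (d : PySem.Dict Int (PySem.Set Int)) (ck : PySem.Set (Int × Int)),
      curr ∈ P → pvRel d ck →
      ((PySem.List.pyRange u x 1).foldl (pvForU Dl curr) (P, d)).1 = (pvScanB Dl curr n u x P ck).1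
      ∧ pvRel ((PySem.List.pyRange u x 1).foldl (pvForU Dl curr) (P, d)).2
            (pvScanB Dl curr n u x P ck).2 := by
  intro n
  induction n with
  | zero =>
    intro u hn P d ck hP hrel
    rw [PySem.List.pyRange_one_eq_nil (by omega)]
    exact ⟨rfl, hrel⟩
  | succ n ih =>
    intro u hn P d ck hP hrel
    have hlt : u < x := by omega
    rw [PySem.List.pyRange_one_cons hlt, List.foldl_cons, pvScanB]
    by_cases hc : u ∈ d.getD curr PySem.Set.empty
    · have hA : PySem.Set.contains (d.getD curr PySem.Set.empty) u = true :=
        (PySem.Set.contains_iff _ _).mpr hc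
      have hB : PySem.Set.contains ck (curr, u) = true :=
        (PySem.Set.contains_iff _ _).mpr ((hrel curr u).mp hc)
      rw [show pvForU Dl curr (P, d) u = (P, d) by rw [pvForU, if_pos hA]]
      simp only [if_pos hB]
      exact ih (u + 1) (by omega) P d ck hP hrel
    · have hA : ¬ PySem.Set.contains (d.getD curr PySem.Set.empty) u = true := by
        rw [PySem.Set.contains_iff]; exact hc
      have hB : ¬ PySem.Set.contains ck (curr, u) = true := by
        rw [PySem.Set.contains_iff]
        exact fun hb => hc ((hrel curr u).mpr hb)
      have hrr : pyreplace P curr u = insAfterLast P curr u :=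
        pyreplace_eq_insAfterLast P curr u hP
      rw [show pvForU Dl curr (P, d) u =
            ((if insAfterLast P curr u ∈ Dl then insAfterLast P curr u else P),
             d.modify curr PySem.Set.empty (fun s => PySem.Set.add s u)) by
        rw [pvForU, if_neg hA]; simp only [hrr]]
      simp only [if_neg hB]
      apply ih (u + 1) (by omega)
      · split
        · exact mem_insAfterLast _ _ _ hP
        · exact hP
      · exact rel_add hrel curr u

-- the recursive visits agree: fuel, walk, and checked state stay in correspondence
lemma visit_eq (Dl : List (List Int)) :
    ∀ (f : Nat) (curr : Int) (P : List Int) (d : PySem.Dict Int (PySem.Set Int))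
      (ck : PySem.Set (Int × Int)), curr ∈ P → pvRel d ck →
      (pvVisitA Dl f curr P d).val.1 = (pvVisitB Dl f curr P ck).val.1
      ∧ (pvVisitA Dl f curr P d).val.2.1 = (pvVisitB Dl f curr P ck).val.2.1
      ∧ pvRel (pvVisitA Dl f curr P d).val.2.2 (pvVisitB Dl f curr P ck).val.2.2 := by
  intro f
  induction f using Nat.strong_induction_on with
  | _ f ih =>
    intro curr P d ck hP hrel
    match f with
    | 0 => rw [pvVisitA, pvVisitB]; exact ⟨rfl, rfl, hrel⟩
    | f + 1 =>
      rw [pvVisitA, pvVisitB]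
      simp only
      set x := ((PySem.List.max? P (fun y => y)).getD 0) + 1 with hx
      obtain ⟨hsP, hsrel⟩ := scan_eq Dl curr x (x - (curr + 1)).toNat (curr + 1) rfl P d ck hP hrel
      have hscurr : curr ∈ (pvScanB Dl curr (x - (curr + 1)).toNat (curr + 1) x P ck).1 :=
        scanB_mono Dl curr _ _ _ _ _ _ hP
      have hrr : pyreplace ((PySem.List.pyRange (curr + 1) x 1).foldl (pvForU Dl curr) (P, d)).1 curr x
          = insAfterLast (pvScanB Dl curr (x - (curr + 1)).toNat (curr + 1) x P ck).1 curr x := by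
        rw [hsP, pyreplace_eq_insAfterLast _ _ _ hscurr]
      by_cases hin : insAfterLast (pvScanB Dl curr (x - (curr + 1)).toNat (curr + 1) x P ck).1 curr x ∈ Dl
      · have hinA : pyreplace ((PySem.List.pyRange (curr + 1) x 1).foldl (pvForU Dl curr) (P, d)).1 curr x ∈ Dl := by
          rw [hrr]; exact hin
        rw [if_pos hinA, if_pos hin]
        dsimp only
        rw [hrr]
        have hx_mem : x ∈ insAfterLast (pvScanB Dl curr (x - (curr + 1)).toNat (curr + 1) x P ck).1 curr x :=
          target_mem_insAfterLast _ _ _ hscurr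
        obtain ⟨h1f, h1P, h1rel⟩ := ih f (Nat.lt_succ_self f) x _ _ _ hx_mem (rel_add hsrel curr x)
        have hcurr1 : curr ∈ (pvVisitB Dl f x (insAfterLast (pvScanB Dl curr (x - (curr + 1)).toNat (curr + 1) x P ck).1 curr x) (PySem.Set.add (pvScanB Dl curr (x - (curr + 1)).toNat (curr + 1) x P ck).2 (curr, x))).val.2.1 :=
          visitB_mono Dl f x _ _ curr (mem_insAfterLast _ _ _ hscurr)
        rw [h1f, h1P]
        exact ih _ (Nat.lt_succ_of_le (by rw [← h1f]; exact (pvVisitA Dl f x _ _).prop))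
          curr _ _ _ hcurr1 h1rel
      · have hinA : ¬ pyreplace ((PySem.List.pyRange (curr + 1) x 1).foldl (pvForU Dl curr) (P, d)).1 curr x ∈ Dl := by
          rw [hrr]; exact hin
        rw [if_neg hinA, if_neg hin]
        exact ⟨rfl, hsP, hsrel⟩

-- ===== VERDICT (by name: the statement is the Claim_ definition above) =====
theorem reconstruct_dfs_spec : Claim_equal_reconstruct_dfs := by
  intro Dl _
  unfold Spec_reconstruct_dfs reconstruct_dfs reconstruct_dfs_alt
  rw [pvLoopA_eq_visit, pvLoopA_nil]
  exact (visit_eq Dl _ 0 [0] PySem.Dict.empty PySem.Set.empty (by simp) rel_empty).2.1
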